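-- pv_equiv track=rewrite | github.com/edsonpavoni/orbital-temple-witnesses | experiments/09_witness/tools/phase0_plot.py | split_segments
-- ===== SOURCE A (Python) =====
-- def split_segments(events):
--     """Return (cw_events, ccw_events) — the slices of the log corresponding
--     to the CW and CCW sweeps (ph='C' and ph='A' respectively)."""
--     cw, ccw = [], []
--     cur_phase = None
--     for ev in events:
--         if "ph" in ev:
--             cur_phase = ev["ph"]
--         if cur_phase == "C":
--             cw.append(ev)
--         elif cur_phase == "A":
--             ccw.append(ev)
--     return cw, ccw
-- ===== SOURCE B (Python) =====
-- def split_segments(events):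
--     # Forward-fill phase table once, then filter twice.
--     phases = []
--     p = None
--     for ev in events:
--         if "ph" in ev:
--             p = ev["ph"]
--         phases.append(p)
--     cw = [ev for ev, p in zip(events, phases) if p == "C"]
--     ccw = [ev for ev, p in zip(events, phases) if p == "A"]
--     return cw, ccw
-- ===== Notes on version B (the rewrite author's own statement) =====
-- stated objective: alternative
-- what changed: Replaced the single stateful loop that appends interleaved into cw/ccw with a forward-fill pass building a parallel phase table followed by two independent filtering comprehensions.
import Mathlib
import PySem

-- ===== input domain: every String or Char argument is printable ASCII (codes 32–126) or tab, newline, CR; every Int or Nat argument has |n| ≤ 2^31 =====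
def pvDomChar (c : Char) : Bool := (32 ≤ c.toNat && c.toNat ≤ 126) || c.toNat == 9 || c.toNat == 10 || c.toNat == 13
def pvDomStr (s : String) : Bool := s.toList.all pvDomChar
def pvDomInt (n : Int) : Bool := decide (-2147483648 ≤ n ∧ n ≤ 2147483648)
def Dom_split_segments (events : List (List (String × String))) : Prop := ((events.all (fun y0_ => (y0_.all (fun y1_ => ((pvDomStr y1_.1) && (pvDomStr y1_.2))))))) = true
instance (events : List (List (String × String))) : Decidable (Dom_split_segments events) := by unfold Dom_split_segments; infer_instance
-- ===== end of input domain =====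

-- ===== PORT A =====
-- B restructures A's single stateful appending loop into a forward-fill phase pass plus two filters (alternative decomposition).
-- ev["ph"] / "ph" in ev on an association list: first match
def ssGet (ev : List (String × String)) : Option String :=
  (ev.find? (fun kv => kv.1 == "ph")).map Prod.snd

-- one iteration of A's loop body over the state (cw, ccw, cur_phase)
def ssStep (st : List (List (String × String)) × List (List (String × String)) × Option String)
    (ev : List (String × String)) :
    List (List (String × String)) × List (List (String × String)) × Option String :=
  let cur := if (ssGet ev).isSome then ssGet ev else st.2.2
  if cur = some "C" then (st.1 ++ [ev], st.2.1, cur)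
  else if cur = some "A" then (st.1, st.2.1 ++ [ev], cur)
  else (st.1, st.2.1, cur)

def split_segments (events : List (List (String × String))) :
    (List (List (String × String))) × (List (List (String × String))) :=
  let st := events.foldl ssStep ([], [], none)
  (st.1, st.2.1)

-- ===== PORT B =====
-- forward-fill of the last seen "ph" value
def ssPhases (p : Option String) : List (List (String × String)) → List (Option String)
  | [] => []
  | ev :: rest =>
    let q := if (ssGet ev).isSome then ssGet ev else p
    q :: ssPhases q rest

def split_segments_alt (events : List (List (String × String))) :
    (List (List (String × String))) × (List (List (String × String))) :=
  let phases := ssPhases none events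
  (((events.zip phases).filter (fun x => x.2 == some "C")).map Prod.fst,
   ((events.zip phases).filter (fun x => x.2 == some "A")).map Prod.fst)

-- ===== PRECONDITION & SPEC =====
def Spec_split_segments (events : List (List (String × String))) (out : (List (List (String × String))) × (List (List (String × String)))) : Prop := out = split_segments_alt events
instance (events : List (List (String × String))) (out : (List (List (String × String))) × (List (List (String × String)))) : Decidable (Spec_split_segments events out) := by unfold Spec_split_segments; infer_instance

-- ===== CLAIM (what is proved, stated in full; the proofs are below) =====
def Claim_equal_split_segments : Prop := ∀ (events : List (List (String × String))), Dom_split_segments events → Spec_split_segments events (split_segments events)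

-- ===== LEMMAS AND PROOFS =====
lemma ss_lastD {α : Type} (l : List α) (a d : α) :
    (a :: l).getLast?.getD d = l.getLast?.getD a := by
  cases h : l.getLast? with
  | none => simp [List.getLast?_eq_none_iff.mp h]
  | some b => simp [List.getLast?_cons, h]

lemma ss_fold_phases (events : List (List (String × String)))
    (cw ccw : List (List (String × String))) (p : Option String) :
    events.foldl ssStep (cw, ccw, p)
    = (cw ++ ((events.zip (ssPhases p events)).filter (fun x => x.2 == some "C")).map Prod.fst,
       ccw ++ ((events.zip (ssPhases p events)).filter (fun x => x.2 == some "A")).map Prod.fst,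
       (ssPhases p events).getLastD p) := by
  induction events generalizing cw ccw p with
  | nil => simp [ssPhases]
  | cons ev rest ih =>
    rw [List.foldl_cons]
    have hq : ssPhases p (ev :: rest)
        = (if (ssGet ev).isSome then ssGet ev else p) :: ssPhases (if (ssGet ev).isSome then ssGet ev else p) rest := rfl
    set q := if (ssGet ev).isSome then ssGet ev else p with hqdef
    by_cases hC : q = some "C"
    · have hstep : ssStep (cw, ccw, p) ev = (cw ++ [ev], ccw, q) := by
        simp [ssStep, ← hqdef, hC]
      rw [hstep, ih, hq, hC]
      simp [ss_lastD]
    · by_cases hA : q = some "A"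
      · have hstep : ssStep (cw, ccw, p) ev = (cw, ccw ++ [ev], q) := by
          simp [ssStep, ← hqdef, hA]
        rw [hstep, ih, hq, hA]
        simp [ss_lastD]
      · have hstep : ssStep (cw, ccw, p) ev = (cw, ccw, q) := by
          simp [ssStep, ← hqdef, hC, hA]
        rw [hstep, ih, hq]
        simp [hC, hA, ss_lastD]

-- ===== VERDICT (by name: the statement is the Claim_ definition above) =====
theorem split_segments_spec : Claim_equal_split_segments := by
  intro events _
  unfold Spec_split_segments split_segments split_segments_alt
  rw [ss_fold_phases]
  simp
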